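-- pv_equiv track=rewrite | github.com/anuarovanazerke/ADS-labs | lab8.py | rabin_karp_hashes
-- ===== SOURCE A (Python) =====
-- def rabin_karp_hashes(s, L, base=257, mod=10**9 + 7):
--     if L > len(s):
--         return set()
--
--     h = 0
--     power = pow(base, L - 1, mod)
--     hashes = set()
--     for i in range(L):
--         h = (h * base + ord(s[i])) % mod
--     hashes.add(h)
--
--     for i in range(L, len(s)):
--         h = (h - ord(s[i - L]) * power) % mod
--         h = (h * base + ord(s[i])) % mod
--         hashes.add(h)
--
--     return hashes
-- ===== SOURCE B (Python) =====
-- def rabin_karp_hashes(s, L, base=257, mod=10**9 + 7):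
--     if L > len(s):
--         return set()
--     hashes = set()
--     for i in range(len(s) - L + 1):
--         h = 0
--         for j in range(L):
--             h = (h * base + ord(s[i + j])) % mod
--         hashes.add(h)
--     return hashes
-- ===== Notes on version B (the rewrite author's own statement) =====
-- stated objective: simpler
-- what changed: Replaces A's rolling-hash update (precomputed power pow(base,L-1,mod) and subtract-and-shift recurrence) with a plain nested loop that recomputes each window's polynomial hash from scratch.
-- outside the precondition, e.g. on rabin_karp_hashes('a', 0, 2, 7): A returns {0}, B returns {0}
import Mathlib
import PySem

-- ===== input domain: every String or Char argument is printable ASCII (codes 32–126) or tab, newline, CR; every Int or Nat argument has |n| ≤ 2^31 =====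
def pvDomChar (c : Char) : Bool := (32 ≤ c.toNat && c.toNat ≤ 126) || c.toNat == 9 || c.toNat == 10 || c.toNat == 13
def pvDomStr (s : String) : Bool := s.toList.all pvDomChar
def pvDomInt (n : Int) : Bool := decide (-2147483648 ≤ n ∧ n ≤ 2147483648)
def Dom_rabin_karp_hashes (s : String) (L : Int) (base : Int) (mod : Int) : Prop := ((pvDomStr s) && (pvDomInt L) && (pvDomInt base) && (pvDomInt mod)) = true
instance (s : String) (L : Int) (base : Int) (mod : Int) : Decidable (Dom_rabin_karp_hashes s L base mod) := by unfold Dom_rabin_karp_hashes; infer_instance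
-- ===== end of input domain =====

-- B replaces A's rolling-hash update (precomputed power, subtract-and-shift) by a direct
-- recomputation of each window's polynomial hash with a plain nested loop (simpler, not faster).

-- ===== PORT A =====
-- ord(s[i]); every use below is at an in-range index, where pyGet? is some
def pyOrdAt (s : String) (i : Int) : Int :=
  (PySem.Str.pyGet? s i).elim 0 (fun c => (c.toNat : Int))

def rabin_karp_hashes (s : String) (L : Int) (base : Int) (mod : Int) : List Int :=
  if L > PySem.Str.len s then []
  else
    -- pow(base, L - 1, mod): PySem.Int.powMod takes a Nat exponent, so this is exact for
    -- L ≥ 1 (Pre_); for L ≤ 0 Python's 3-arg pow has a negative exponent, outside Pre_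
    let power : Int := PySem.Int.powMod base (L - 1).toNat mod
    let h0 : Int :=
      (PySem.List.pyRange 0 L 1).foldl
        (fun h i => PySem.Int.mod (h * base + pyOrdAt s i) mod) 0
    ((PySem.List.pyRange L (PySem.Str.len s) 1).foldl
        (fun (p : Int × PySem.Set Int) i =>
          let h1 := PySem.Int.mod (p.1 - pyOrdAt s (i - L) * power) mod
          let h2 := PySem.Int.mod (h1 * base + pyOrdAt s i) mod
          (h2, PySem.Set.add p.2 h2))
        (h0, PySem.Set.add PySem.Set.empty h0)).2

-- ===== PORT B =====
def rabin_karp_hashes_alt (s : String) (L : Int) (base : Int) (mod : Int) : List Int :=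
  if L > PySem.Str.len s then []
  else
    (PySem.List.pyRange 0 (PySem.Str.len s - L + 1) 1).foldl
      (fun acc i =>
        PySem.Set.add acc
          ((PySem.List.pyRange 0 L 1).foldl
            (fun h j => PySem.Int.mod (h * base + pyOrdAt s (i + j)) mod) 0))
      PySem.Set.empty

-- ===== PRECONDITION & SPEC =====
-- Pre_ excludes L ≤ 0 — there A's unguarded pow(base, L-1, mod) has a negative exponent: for
-- L < 0 A always raises (IndexError or ValueError), for L = 0 it raises ValueError unless base
-- is invertible mod mod, and where it does return both programs return {0} — and mod = 0 when
-- the length guard does not fire (pow / % raise ValueError/ZeroDivisionError there).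
def Pre_rabin_karp_hashes (s : String) (L : Int) (base : Int) (mod : Int) : Prop :=
  1 ≤ L ∧ (PySem.Str.len s < L ∨ mod ≠ 0)
instance (s : String) (L : Int) (base : Int) (mod : Int) : Decidable (Pre_rabin_karp_hashes s L base mod) := by unfold Pre_rabin_karp_hashes; infer_instance

def pvWitness_rabin_karp_hashes : String × Int × Int × Int := ("abc", 2, 257, 1000000007)

def Spec_rabin_karp_hashes (s : String) (L : Int) (base : Int) (mod : Int) (out : List Int) : Prop := out = rabin_karp_hashes_alt s L base mod
instance (s : String) (L : Int) (base : Int) (mod : Int) (out : List Int) : Decidable (Spec_rabin_karp_hashes s L base mod out) := by unfold Spec_rabin_karp_hashes; infer_instance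

-- ===== CLAIM (what is proved, stated in full; the proofs are below) =====
def Claim_equal_rabin_karp_hashes : Prop := ∀ (s : String) (L : Int) (base : Int) (mod : Int), Dom_rabin_karp_hashes s L base mod → Pre_rabin_karp_hashes s L base mod → Spec_rabin_karp_hashes s L base mod (rabin_karp_hashes s L base mod)

-- ===== LEMMAS AND PROOFS =====

-- hash of the length-L window starting at t (exactly B's inner fold)
def pvWin (s : String) (base m t L : Int) : Int :=
  (PySem.List.pyRange 0 L 1).foldl
    (fun h j => PySem.Int.mod (h * base + pyOrdAt s (t + j)) m) 0

-- the same polynomial without any reduction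
def pvPure (s : String) (base t : Int) : Nat → Int
  | 0 => 0
  | Nat.succ k => pvPure s base t k * base + pyOrdAt s (t + (k : Int))

lemma pv_pmod_modeq (x m : Int) : PySem.Int.mod x m ≡ x [ZMOD m] := by
  rw [Int.modEq_iff_dvd]
  refine ⟨PySem.Int.floordiv x m, ?_⟩
  have h := PySem.Int.floordiv_mul_add_mod x m
  linear_combination (-1 : ℤ) * h

lemma pv_pmod_congr {m x y : Int} (hm : m ≠ 0) (h : x ≡ y [ZMOD m]) :
    PySem.Int.mod x m = PySem.Int.mod y m := by
  rcases lt_or_gt_of_ne hm with hneg | hpos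
  · have hx := PySem.Int.mod_neg_neg (-x) (-m)
    have hy := PySem.Int.mod_neg_neg (-y) (-m)
    simp only [neg_neg] at hx hy
    have h' : (-x) ≡ (-y) [ZMOD -m] := by
      rw [Int.modEq_iff_dvd] at h ⊢
      have e : (-y) - (-x) = -(y - x) := by ring
      rw [e, neg_dvd, dvd_neg]; exact h
    rw [hx, hy, neg_inj]
    rw [PySem.Int.mod_eq_emod_of_pos (by omega : (0:Int) < -m)]
    rw [PySem.Int.mod_eq_emod_of_pos (by omega : (0:Int) < -m)]
    exact h'
  · rw [PySem.Int.mod_eq_emod_of_pos hpos, PySem.Int.mod_eq_emod_of_pos hpos]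
    exact h

lemma pvWin_succ (s : String) (base m t : Int) (k : Nat) :
    pvWin s base m t ((k : Int) + 1)
      = PySem.Int.mod (pvWin s base m t (k : Int) * base + pyOrdAt s (t + (k : Int))) m := by
  simp only [pvWin]
  rw [PySem.List.pyRange_one_succ_right (Int.natCast_nonneg k), List.foldl_append]
  simp

lemma pvWin_eq_pure (s : String) (base m t : Int) (k : Nat) :
    pvWin s base m t (k : Int) ≡ pvPure s base t k [ZMOD m] := by
  induction k with
  | zero =>
      simp only [Nat.cast_zero, pvWin, pvPure,
        PySem.List.pyRange_one_eq_nil (by omega : (0:Int) ≤ 0), List.foldl_nil]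
      rfl
  | succ k ih =>
      rw [show ((k + 1 : Nat) : Int) = (k : Int) + 1 from by push_cast; ring, pvWin_succ]
      show _ ≡ pvPure s base t k * base + pyOrdAt s (t + (k : Int)) [ZMOD m]
      exact (pv_pmod_modeq _ m).trans ((ih.mul_right base).add_right _)

lemma pvPure_shift (s : String) (base t : Int) (k : Nat) :
    pvPure s base t (k + 1) = pyOrdAt s t * base ^ k + pvPure s base (t + 1) k := by
  induction k with
  | zero => simp [pvPure]
  | succ k ih =>
      show pvPure s base t (k + 1) * base + pyOrdAt s (t + ((k + 1 : Nat) : Int)) = _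
      rw [ih, show t + ((k + 1 : Nat) : Int) = (t + 1) + (k : Int) from by push_cast; ring]
      show _ = pyOrdAt s t * base ^ (k + 1)
               + (pvPure s base (t + 1) k * base + pyOrdAt s ((t + 1) + (k : Int)))
      ring

lemma pv_roll (s : String) (base m L : Int) (hm : m ≠ 0) (hL : 1 ≤ L) (t : Int) :
    PySem.Int.mod
      ((PySem.Int.mod (pvWin s base m t L - pyOrdAt s t * PySem.Int.powMod base (L - 1).toNat m) m)
        * base + pyOrdAt s (t + L)) m
      = pvWin s base m (t + 1) L := by
  obtain ⟨k, hk⟩ : ∃ k : Nat, L = (k : Int) + 1 := ⟨(L - 1).toNat, by omega⟩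
  subst hk
  have hkk : (((k : Int) + 1) - 1).toNat = k := by omega
  have hpow : PySem.Int.powMod base ((((k : Int) + 1) - 1)).toNat m
      = PySem.Int.mod (base ^ k) m := by
    rw [hkk]; simp [PySem.Int.powMod]
  rw [pvWin_succ s base m (t + 1) k]
  apply pv_pmod_congr hm
  rw [show t + ((k : Int) + 1) = (t + 1) + (k : Int) from by ring]
  refine Int.ModEq.add_right _ (Int.ModEq.mul_right base ?_)
  refine (pv_pmod_modeq _ m).trans ?_
  rw [hpow, show ((k : Int) + 1) = ((k + 1 : Nat) : Int) from by push_cast; ring]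
  refine (Int.ModEq.sub (pvWin_eq_pure s base m t (k + 1))
    ((pv_pmod_modeq (base ^ k) m).mul_left (pyOrdAt s t))).trans ?_
  rw [show pvPure s base t (k + 1) - pyOrdAt s t * base ^ k = pvPure s base (t + 1) k from by
    rw [pvPure_shift]; ring]
  exact (pvWin_eq_pure s base m (t + 1) k).symm

lemma pv_loop (s : String) (base m L : Int) (hm : m ≠ 0) (hL : 1 ≤ L) (cnt : Nat) :
    ∀ (a : Int) (S : PySem.Set Int), L ≤ a → a ≤ PySem.Str.len s →
      cnt = (PySem.Str.len s - a).toNat →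
      ((PySem.List.pyRange a (PySem.Str.len s) 1).foldl
          (fun (p : Int × PySem.Set Int) i =>
            (PySem.Int.mod (PySem.Int.mod (p.1 - pyOrdAt s (i - L) * PySem.Int.powMod base (L - 1).toNat m) m * base + pyOrdAt s i) m,
             PySem.Set.add p.2 (PySem.Int.mod (PySem.Int.mod (p.1 - pyOrdAt s (i - L) * PySem.Int.powMod base (L - 1).toNat m) m * base + pyOrdAt s i) m)))
          (pvWin s base m (a - L) L, S)).2
      = (PySem.List.pyRange (a - L + 1) (PySem.Str.len s - L + 1) 1).foldl
          (fun acc i => PySem.Set.add acc (pvWin s base m i L)) S := by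
  induction cnt with
  | zero =>
      intro a S hLa han hcnt
      rw [PySem.List.pyRange_one_eq_nil (by omega : PySem.Str.len s ≤ a),
          PySem.List.pyRange_one_eq_nil (by omega : PySem.Str.len s - L + 1 ≤ a - L + 1)]
      simp
  | succ n ih =>
      intro a S hLa han hcnt
      have hlt : a < PySem.Str.len s := by omega
      rw [PySem.List.pyRange_one_cons hlt,
          PySem.List.pyRange_one_cons (by omega : a - L + 1 < PySem.Str.len s - L + 1)]
      simp only [List.foldl_cons]
      have hroll := pv_roll s base m L hm hL (a - L)
      rw [show a - L + L = a from by ring] at hroll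
      rw [hroll, show a - L + 1 = (a + 1) - L from by ring]
      exact ih (a + 1) (PySem.Set.add S (pvWin s base m ((a + 1) - L) L))
        (by omega) (by omega) (by omega)

-- ===== VERDICT (by name: the statement is the Claim_ definition above) =====
theorem rabin_karp_hashes_spec : Claim_equal_rabin_karp_hashes := by
  intro s L base m hdom hpre
  obtain ⟨hL, hor⟩ := hpre
  unfold Spec_rabin_karp_hashes
  by_cases hg : L > PySem.Str.len s
  · unfold rabin_karp_hashes rabin_karp_hashes_alt
    rw [if_pos hg, if_pos hg]
  · have hLn : L ≤ PySem.Str.len s := by omega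
    have hm : m ≠ 0 := by
      rcases hor with h | h
      · omega
      · exact h
    unfold rabin_karp_hashes rabin_karp_hashes_alt
    rw [if_neg hg, if_neg hg]
    have h0eq : (PySem.List.pyRange 0 L 1).foldl
        (fun h i => PySem.Int.mod (h * base + pyOrdAt s i) m) 0 = pvWin s base m 0 L := by
      simp only [pvWin, zero_add]
    show ((PySem.List.pyRange L (PySem.Str.len s) 1).foldl
        (fun (p : Int × PySem.Set Int) i =>
          (PySem.Int.mod (PySem.Int.mod (p.1 - pyOrdAt s (i - L) * PySem.Int.powMod base (L - 1).toNat m) m * base + pyOrdAt s i) m,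
           PySem.Set.add p.2 (PySem.Int.mod (PySem.Int.mod (p.1 - pyOrdAt s (i - L) * PySem.Int.powMod base (L - 1).toNat m) m * base + pyOrdAt s i) m)))
        ((PySem.List.pyRange 0 L 1).foldl
            (fun h i => PySem.Int.mod (h * base + pyOrdAt s i) m) 0,
         PySem.Set.add PySem.Set.empty
           ((PySem.List.pyRange 0 L 1).foldl
              (fun h i => PySem.Int.mod (h * base + pyOrdAt s i) m) 0))).2
      = (PySem.List.pyRange 0 (PySem.Str.len s - L + 1) 1).foldl
          (fun acc i => PySem.Set.add acc (pvWin s base m i L)) PySem.Set.empty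
    rw [h0eq]
    have hloop := pv_loop s base m L hm hL ((PySem.Str.len s - L).toNat) L
      (PySem.Set.add PySem.Set.empty (pvWin s base m 0 L)) (le_refl L) hLn rfl
    rw [sub_self] at hloop
    rw [zero_add] at hloop
    rw [hloop]
    rw [PySem.List.pyRange_one_cons (by omega : (0:Int) < PySem.Str.len s - L + 1)]
    simp only [List.foldl_cons]
    rw [zero_add]
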